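-- pv_equiv track=rewrite | github.com/liskos/gutnikov | варианты2025/шастинбахтиев/11/27.py | clasterization_1
-- ===== SOURCE A (Python) =====
-- def clasterization_1(data):
--     clasters = [[],[],[]]
--     for x, y in data:
--         if y < 0:
--             clasters[0].append([x, y])
--         elif y > 15:
--             clasters[1].append([x, y])
--         else:
--             clasters[2].append([x, y])
--     return clasters
-- ===== SOURCE B (Python) =====
-- def clasterization_1(data):
--     return [
--         [[x, y] for x, y in data if y < 0],
--         [[x, y] for x, y in data if y > 15],
--         [[x, y] for x, y in data if 0 <= y <= 15],
--     ]
-- ===== Notes on version B (the rewrite author's own statement) =====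
-- stated objective: simpler
-- what changed: Replaces the single loop mutating three accumulator lists with three independent filtering comprehensions over the data, one per cluster.
import Mathlib
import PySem

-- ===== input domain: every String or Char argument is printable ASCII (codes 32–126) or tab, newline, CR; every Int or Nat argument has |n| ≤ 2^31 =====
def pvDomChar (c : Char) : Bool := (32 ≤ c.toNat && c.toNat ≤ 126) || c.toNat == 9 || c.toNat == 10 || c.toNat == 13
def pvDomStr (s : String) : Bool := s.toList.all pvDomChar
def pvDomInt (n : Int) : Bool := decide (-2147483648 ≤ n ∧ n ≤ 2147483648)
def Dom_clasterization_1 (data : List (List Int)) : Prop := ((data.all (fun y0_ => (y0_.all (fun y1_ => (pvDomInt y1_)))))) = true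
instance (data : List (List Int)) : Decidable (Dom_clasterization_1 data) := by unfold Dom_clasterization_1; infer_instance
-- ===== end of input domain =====

-- B replaces A's single loop over three mutable accumulators by three independent
-- filtering passes over the data (objective: simpler decomposition; same results).

-- ===== PORT A =====
-- one loop step: unpack [x, y] and append [x, y] to the matching cluster
-- (Pre_ guarantees every element is a 2-list, so the catch-all branch is unreachable)
def clastStep (st : List (List Int) × List (List Int) × List (List Int)) (p : List Int) :
    List (List Int) × List (List Int) × List (List Int) :=
  match p with
  | [x, y] =>
    if y < 0 then (st.1 ++ [[x, y]], st.2.1, st.2.2)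
    else if y > 15 then (st.1, st.2.1 ++ [[x, y]], st.2.2)
    else (st.1, st.2.1, st.2.2 ++ [[x, y]])
  | _ => st

def clasterization_1 (data : List (List Int)) : List (List (List Int)) :=
  let c := data.foldl clastStep ([], [], [])
  [c.1, c.2.1, c.2.2]

-- ===== PORT B =====
-- three independent comprehensions, one per cluster
def cluster0 (data : List (List Int)) : List (List Int) :=
  data.filterMap (fun p => match p with
    | [x, y] => if y < 0 then some [x, y] else none
    | _ => none)

def cluster1 (data : List (List Int)) : List (List Int) :=
  data.filterMap (fun p => match p with
    | [x, y] => if y > 15 then some [x, y] else none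
    | _ => none)

def cluster2 (data : List (List Int)) : List (List Int) :=
  data.filterMap (fun p => match p with
    | [x, y] => if 0 ≤ y ∧ y ≤ 15 then some [x, y] else none
    | _ => none)

def clasterization_1_alt (data : List (List Int)) : List (List (List Int)) :=
  [cluster0 data, cluster1 data, cluster2 data]

-- ===== PRECONDITION & SPEC =====
-- Pre_ excludes inputs whose elements are not 2-lists: there the Python `for x, y in data`
-- unpacking raises ValueError in both A and B.
def Pre_clasterization_1 (data : List (List Int)) : Prop :=
  ∀ p ∈ data, p.length = 2

instance (data : List (List Int)) : Decidable (Pre_clasterization_1 data) := by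
  unfold Pre_clasterization_1; infer_instance

def pvWitness_clasterization_1 : List (List Int) := [[1, -3], [2, 20], [3, 7]]

def Spec_clasterization_1 (data : List (List Int)) (out : List (List (List Int))) : Prop := out = clasterization_1_alt data
instance (data : List (List Int)) (out : List (List (List Int))) : Decidable (Spec_clasterization_1 data out) := by unfold Spec_clasterization_1; infer_instance

-- ===== CLAIM (what is proved, stated in full; the proofs are below) =====
def Claim_equal_clasterization_1 : Prop := ∀ (data : List (List Int)), Dom_clasterization_1 data → Pre_clasterization_1 data → Spec_clasterization_1 data (clasterization_1 data)

-- ===== LEMMAS AND PROOFS =====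

-- loop invariant: the fold appends each cluster's filterMap to its accumulator
theorem foldl_clastStep (data : List (List Int)) :
    ∀ a b c, data.foldl clastStep (a, b, c) =
      (a ++ cluster0 data, b ++ cluster1 data, c ++ cluster2 data) := by
  induction data with
  | nil => intro a b c; simp [cluster0, cluster1, cluster2]
  | cons p tl ih =>
    intro a b c
    match p with
    | [] => simp [clastStep, cluster0, cluster1, cluster2, List.foldl, ih]
    | [x] => simp [clastStep, cluster0, cluster1, cluster2, List.foldl, ih]
    | x :: y :: z :: r => simp [clastStep, cluster0, cluster1, cluster2, List.foldl, ih]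
    | [x, y] =>
      simp only [List.foldl, clastStep, cluster0, cluster1, cluster2, List.filterMap]
      by_cases h0 : y < 0
      · have h1 : ¬ (15 < y) := by omega
        have h2 : ¬ (0 ≤ y ∧ y ≤ 15) := by omega
        simp [h0, h1, h2, ih, cluster0, cluster1, cluster2]
      · by_cases h1 : y > 15
        · have h2 : ¬ (0 ≤ y ∧ y ≤ 15) := by omega
          simp [h0, h1, h2, ih, cluster0, cluster1, cluster2]
        · have h2 : 0 ≤ y ∧ y ≤ 15 := ⟨by omega, by omega⟩
          simp [h0, h1, h2, ih, cluster0, cluster1, cluster2]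

-- ===== VERDICT (by name: the statement is the Claim_ definition above) =====
theorem clasterization_1_spec : Claim_equal_clasterization_1 := by
  intro data _ _
  unfold Spec_clasterization_1 clasterization_1 clasterization_1_alt
  simp [foldl_clastStep]
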